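-- pv_equiv track=rewrite | github.com/blueeye2015/okx | ma60_strategy.py | group_symbols_by_market_value
-- ===== SOURCE A (Python) =====
-- from typing import Optional, List, Dict
--
-- def group_symbols_by_market_value(symbols_info: List[Dict]) -> Dict[str, List[Dict]]:
--     """按市值分组"""
--     groups = {
--         'small': [],    # < 1000w
--         'medium': [],   # 1000w - 1亿
--         'large': []     # > 1亿
--     }
--
--     for symbol_info in symbols_info:
--         market_value = symbol_info['market_value']
--         if market_value < 10000000:  # 1000w
--             groups['small'].append(symbol_info)
--         elif market_value < 100000000:  # 1亿
--             groups['medium'].append(symbol_info)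
--         else:
--             groups['large'].append(symbol_info)
--
--     return groups
-- ===== SOURCE B (Python) =====
-- from typing import Optional, List, Dict
--
-- def group_symbols_by_market_value(symbols_info: List[Dict]) -> Dict[str, List[Dict]]:
--     """按市值分组 (three staged filter passes, one per bucket, instead of one bucketing loop)"""
--     return {
--         'small':  [s for s in symbols_info if s['market_value'] < 10000000],
--         'medium': [s for s in symbols_info if 10000000 <= s['market_value'] < 100000000],
--         'large':  [s for s in symbols_info if s['market_value'] >= 100000000],
--     }
-- ===== Notes on version B (the rewrite author's own statement) =====
-- stated objective: alternative
-- what changed: Instead of one loop that dispatches each item into a mutable three-bucket dict, B makes three independent filter passes (one comprehension per bucket) and builds the result dict in one literal; no mutable accumulator, and per-bucket order is preserved because each filter keeps input order.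
import Mathlib
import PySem

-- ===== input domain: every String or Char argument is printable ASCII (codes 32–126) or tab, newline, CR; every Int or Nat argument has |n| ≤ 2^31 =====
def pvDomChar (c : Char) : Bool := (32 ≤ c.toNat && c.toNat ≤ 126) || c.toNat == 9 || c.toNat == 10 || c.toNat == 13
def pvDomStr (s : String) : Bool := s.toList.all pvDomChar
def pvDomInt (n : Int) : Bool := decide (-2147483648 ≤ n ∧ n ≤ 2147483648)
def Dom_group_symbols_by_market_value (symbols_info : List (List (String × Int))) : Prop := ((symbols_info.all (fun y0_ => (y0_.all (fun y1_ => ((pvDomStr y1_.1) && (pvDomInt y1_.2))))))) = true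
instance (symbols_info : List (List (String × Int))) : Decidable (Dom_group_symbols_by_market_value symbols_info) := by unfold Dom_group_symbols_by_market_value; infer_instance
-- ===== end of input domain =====

-- B replaces A's single bucketing loop over a mutable dict by three independent filter passes (objective: alternative decomposition).

-- ===== PORT A =====
def group_symbols_by_market_value (symbols_info : List (List (String × Int))) : List (String × List (List (String × Int))) :=
  let groups : PySem.Dict String (List (List (String × Int))) :=
    ((PySem.Dict.empty.insert "small" []).insert "medium" []).insert "large" []
  (symbols_info.foldl (fun g symbol_info =>
      let market_value := (PySem.Dict.mk symbol_info).getD "market_value" 0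
      if market_value < 10000000 then g.modify "small" [] (· ++ [symbol_info])
      else if market_value < 100000000 then g.modify "medium" [] (· ++ [symbol_info])
      else g.modify "large" [] (· ++ [symbol_info])) groups).items

-- ===== PORT B =====
-- the dict literal has three distinct keys, so its items are exactly the three pairs in order
def group_symbols_by_market_value_alt (symbols_info : List (List (String × Int))) : List (String × List (List (String × Int))) :=
  [("small",  symbols_info.filter (fun s => (PySem.Dict.mk s).getD "market_value" 0 < 10000000)),
   ("medium", symbols_info.filter (fun s =>
      10000000 ≤ (PySem.Dict.mk s).getD "market_value" 0 ∧ (PySem.Dict.mk s).getD "market_value" 0 < 100000000)),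
   ("large",  symbols_info.filter (fun s => (PySem.Dict.mk s).getD "market_value" 0 ≥ 100000000))]

-- ===== PRECONDITION & SPEC =====
-- A raises KeyError (and so does B) when a symbol dict lacks the 'market_value' key; Pre_ excludes exactly those inputs.
def Pre_group_symbols_by_market_value (symbols_info : List (List (String × Int))) : Prop :=
  ∀ si ∈ symbols_info, "market_value" ∈ si.map Prod.fst
instance (symbols_info : List (List (String × Int))) : Decidable (Pre_group_symbols_by_market_value symbols_info) := by unfold Pre_group_symbols_by_market_value; infer_instance

def pvWitness_group_symbols_by_market_value : (List (List (String × Int))) :=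
  [[("market_value", 5)], [("market_value", 20000000), ("x", 1)]]

def Spec_group_symbols_by_market_value (symbols_info : List (List (String × Int))) (out : List (String × List (List (String × Int)))) : Prop := out = group_symbols_by_market_value_alt symbols_info
instance (symbols_info : List (List (String × Int))) (out : List (String × List (List (String × Int)))) : Decidable (Spec_group_symbols_by_market_value symbols_info out) := by unfold Spec_group_symbols_by_market_value; infer_instance

-- ===== CLAIM (what is proved, stated in full; the proofs are below) =====
def Claim_equal_group_symbols_by_market_value : Prop := ∀ (symbols_info : List (List (String × Int))), Dom_group_symbols_by_market_value symbols_info → Pre_group_symbols_by_market_value symbols_info → Spec_group_symbols_by_market_value symbols_info (group_symbols_by_market_value symbols_info)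

-- ===== LEMMAS AND PROOFS =====

-- loop invariant: folding A's step over xs from a three-bucket dict with contents a,b,c
-- yields the dict whose buckets are a,b,c extended by the three filters of xs
theorem pv_fold_items (xs : List (List (String × Int)))
    (a b c : List (List (String × Int))) :
    (xs.foldl (fun g symbol_info =>
      let market_value := (PySem.Dict.mk symbol_info).getD "market_value" 0
      if market_value < 10000000 then g.modify "small" [] (· ++ [symbol_info])
      else if market_value < 100000000 then g.modify "medium" [] (· ++ [symbol_info])
      else g.modify "large" [] (· ++ [symbol_info]))
      (PySem.Dict.mk [("small", a), ("medium", b), ("large", c)])).items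
    = [("small",  a ++ xs.filter (fun s => (PySem.Dict.mk s).getD "market_value" 0 < 10000000)),
       ("medium", b ++ xs.filter (fun s =>
          decide (10000000 ≤ (PySem.Dict.mk s).getD "market_value" 0) &&
          decide ((PySem.Dict.mk s).getD "market_value" 0 < 100000000))),
       ("large",  c ++ xs.filter (fun s => decide ((PySem.Dict.mk s).getD "market_value" 0 ≥ 100000000)))] := by
  induction xs generalizing a b c with
  | nil => simp
  | cons x xs ih =>
    simp only [List.foldl_cons]
    by_cases h1 : (PySem.Dict.mk x).getD "market_value" 0 < 10000000
    · have hm : ((PySem.Dict.mk [("small", a), ("medium", b), ("large", c)]).modify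
          "small" [] (· ++ [x]))
          = PySem.Dict.mk [("small", a ++ [x]), ("medium", b), ("large", c)] := by
        apply PySem.Dict.ext
        simp [PySem.Dict.modify, PySem.Dict.contains, PySem.Dict.get?, PySem.Dict.getD,
          PySem.Dict.insert]
      have e1 : ¬ ((10000000 : Int) ≤ (PySem.Dict.mk x).getD "market_value" 0) := by omega
      have e2 : ¬ ((PySem.Dict.mk x).getD "market_value" 0 ≥ 100000000) := by omega
      rw [if_pos h1, hm, ih]
      simp [h1, e1, e2]
    · by_cases h2 : (PySem.Dict.mk x).getD "market_value" 0 < 100000000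
      · have hm : ((PySem.Dict.mk [("small", a), ("medium", b), ("large", c)]).modify
            "medium" [] (· ++ [x]))
            = PySem.Dict.mk [("small", a), ("medium", b ++ [x]), ("large", c)] := by
          apply PySem.Dict.ext
          simp [PySem.Dict.modify, PySem.Dict.contains, PySem.Dict.get?, PySem.Dict.getD,
            PySem.Dict.insert]
        have e1 : (10000000 : Int) ≤ (PySem.Dict.mk x).getD "market_value" 0 := by omega
        have e2 : ¬ ((PySem.Dict.mk x).getD "market_value" 0 ≥ 100000000) := by omega
        rw [if_neg h1, if_pos h2, hm, ih]
        simp [h1, h2, e1, e2]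
      · have hm : ((PySem.Dict.mk [("small", a), ("medium", b), ("large", c)]).modify
            "large" [] (· ++ [x]))
            = PySem.Dict.mk [("small", a), ("medium", b), ("large", c ++ [x])] := by
          apply PySem.Dict.ext
          simp [PySem.Dict.modify, PySem.Dict.contains, PySem.Dict.get?, PySem.Dict.getD,
            PySem.Dict.insert]
        have e1 : (PySem.Dict.mk x).getD "market_value" 0 ≥ 100000000 := by omega
        rw [if_neg h1, if_neg h2, hm, ih]
        simp [h1, h2, e1]

-- ===== VERDICT (by name: the statement is the Claim_ definition above) =====
theorem group_symbols_by_market_value_spec : Claim_equal_group_symbols_by_market_value := by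
  intro symbols_info _ _
  unfold Spec_group_symbols_by_market_value group_symbols_by_market_value group_symbols_by_market_value_alt
  have hinit : (((PySem.Dict.empty.insert "small" ([] : List (List (String × Int)))).insert "medium" []).insert "large" [])
      = PySem.Dict.mk [("small", []), ("medium", []), ("large", [])] := by decide
  rw [hinit, pv_fold_items]
  simp
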